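-- pv_equiv track=rewrite | github.com/SameerJain/CodepathTP101 | unit_7_divide_and_conquer_&_recursion/div_conquer_cheatsheet.py | combine_quarters
-- ===== SOURCE A (Python) =====
-- def combine_quarters(c11, c12, c21, c22):
--     """Combine four quarter matrices into one matrix."""
--     n = len(c11)
--     result = [[0] * (2 * n) for _ in range(2 * n)]
--
--     for i in range(n):
--         for j in range(n):
--             result[i][j] = c11[i][j]
--             result[i][j + n] = c12[i][j]
--             result[i + n][j] = c21[i][j]
--             result[i + n][j + n] = c22[i][j]
--
--     return result
-- ===== SOURCE B (Python) =====
-- def combine_quarters(c11, c12, c21, c22):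
--     """Combine four quarter matrices into one matrix."""
--     n = len(c11)
--     top = [c11[i][:n] + c12[i][:n] for i in range(n)]
--     bottom = [c21[i][:n] + c22[i][:n] for i in range(n)]
--     return top + bottom
-- ===== Notes on version B (the rewrite author's own statement) =====
-- stated objective: simpler
-- what changed: B builds each output row at once by slicing and concatenating the two quarter rows and then concatenates the top and bottom halves, instead of writing every cell of a preallocated 2n-by-2n zero grid through a nested i,j index loop.
import Mathlib
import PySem

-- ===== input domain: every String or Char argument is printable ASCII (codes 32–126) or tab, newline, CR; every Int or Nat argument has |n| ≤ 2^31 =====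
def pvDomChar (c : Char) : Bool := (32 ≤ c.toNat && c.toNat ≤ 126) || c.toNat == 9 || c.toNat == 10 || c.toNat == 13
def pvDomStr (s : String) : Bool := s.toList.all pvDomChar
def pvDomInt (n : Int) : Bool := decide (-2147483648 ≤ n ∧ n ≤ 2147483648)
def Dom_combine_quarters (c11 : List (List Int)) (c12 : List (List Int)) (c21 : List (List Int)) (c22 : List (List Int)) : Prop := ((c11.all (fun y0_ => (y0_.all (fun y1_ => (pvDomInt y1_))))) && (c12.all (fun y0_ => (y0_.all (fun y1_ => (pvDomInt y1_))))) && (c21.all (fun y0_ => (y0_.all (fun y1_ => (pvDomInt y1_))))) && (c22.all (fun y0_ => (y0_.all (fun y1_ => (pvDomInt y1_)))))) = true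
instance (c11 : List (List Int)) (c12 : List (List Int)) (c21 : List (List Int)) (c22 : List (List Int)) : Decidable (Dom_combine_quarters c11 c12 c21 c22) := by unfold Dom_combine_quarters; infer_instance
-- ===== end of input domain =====

-- B builds each output row by slicing and concatenating quarter rows instead of A's nested
-- per-cell index loop into a preallocated zero grid; objective: simpler.

-- ===== PORT A =====
-- m[i][j] as a read; Python raises on out-of-range — Pre_ excludes those inputs, here the default 0 is never reached inside Pre_
def pvGetCell (m : List (List Int)) (i j : Int) : Int :=
  (PySem.List.pyGet? ((PySem.List.pyGet? m i).getD []) j).getD 0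

-- result[i][j] = v; the loop indices are drawn from range(n), hence nonnegative, so .toNat is exact here
def pvSetCell (g : List (List Int)) (i j : Int) (v : Int) : List (List Int) :=
  g.set i.toNat ((g.getD i.toNat []).set j.toNat v)

def combine_quarters (c11 : List (List Int)) (c12 : List (List Int)) (c21 : List (List Int)) (c22 : List (List Int)) : List (List Int) :=
  let n : Int := c11.length
  let result : List (List Int) := List.replicate (2 * n).toNat (List.replicate (2 * n).toNat 0)
  (PySem.List.pyRange 0 n 1).foldl (fun res i =>
    (PySem.List.pyRange 0 n 1).foldl (fun res j =>
      pvSetCell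
        (pvSetCell
          (pvSetCell
            (pvSetCell res i j (pvGetCell c11 i j))
            i (j + n) (pvGetCell c12 i j))
          (i + n) j (pvGetCell c21 i j))
        (i + n) (j + n) (pvGetCell c22 i j)) res) result

-- ===== PORT B =====
def combine_quarters_alt (c11 : List (List Int)) (c12 : List (List Int)) (c21 : List (List Int)) (c22 : List (List Int)) : List (List Int) :=
  let n : Int := c11.length
  let top := (PySem.List.pyRange 0 n 1).map (fun i =>
    PySem.List.slice ((PySem.List.pyGet? c11 i).getD []) none (some n) ++
    PySem.List.slice ((PySem.List.pyGet? c12 i).getD []) none (some n))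
  let bottom := (PySem.List.pyRange 0 n 1).map (fun i =>
    PySem.List.slice ((PySem.List.pyGet? c21 i).getD []) none (some n) ++
    PySem.List.slice ((PySem.List.pyGet? c22 i).getD []) none (some n))
  top ++ bottom

-- ===== PRECONDITION & SPEC =====
-- Pre_ excludes exactly the inputs on which A raises IndexError: fewer than len(c11) rows in a
-- quarter, or one of the first len(c11) rows of a quarter shorter than len(c11).
def Pre_combine_quarters (c11 : List (List Int)) (c12 : List (List Int)) (c21 : List (List Int)) (c22 : List (List Int)) : Prop :=
  c11.length ≤ c12.length ∧ c11.length ≤ c21.length ∧ c11.length ≤ c22.length ∧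
  (∀ r ∈ c11, c11.length ≤ r.length) ∧
  (∀ r ∈ c12.take c11.length, c11.length ≤ r.length) ∧
  (∀ r ∈ c21.take c11.length, c11.length ≤ r.length) ∧
  (∀ r ∈ c22.take c11.length, c11.length ≤ r.length)

instance (c11 : List (List Int)) (c12 : List (List Int)) (c21 : List (List Int)) (c22 : List (List Int)) : Decidable (Pre_combine_quarters c11 c12 c21 c22) := by
  unfold Pre_combine_quarters; infer_instance

def pvWitness_combine_quarters : List (List Int) × List (List Int) × List (List Int) × List (List Int) :=
  ([[1]], [[2]], [[3]], [[4]])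

def Spec_combine_quarters (c11 : List (List Int)) (c12 : List (List Int)) (c21 : List (List Int)) (c22 : List (List Int)) (out : List (List Int)) : Prop := out = combine_quarters_alt c11 c12 c21 c22
instance (c11 : List (List Int)) (c12 : List (List Int)) (c21 : List (List Int)) (c22 : List (List Int)) (out : List (List Int)) : Decidable (Spec_combine_quarters c11 c12 c21 c22 out) := by unfold Spec_combine_quarters; infer_instance

-- ===== CLAIM (what is proved, stated in full; the proofs are below) =====
def Claim_equal_combine_quarters : Prop := ∀ (c11 : List (List Int)) (c12 : List (List Int)) (c21 : List (List Int)) (c22 : List (List Int)), Dom_combine_quarters c11 c12 c21 c22 → Pre_combine_quarters c11 c12 c21 c22 → Spec_combine_quarters c11 c12 c21 c22 (combine_quarters c11 c12 c21 c22)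

-- ===== LEMMAS AND PROOFS =====

-- Nat-level views of the two ports
def pvSetN (g : List (List Int)) (i j : Nat) (v : Int) : List (List Int) :=
  g.set i ((g.getD i []).set j v)

def pvRowF (a b : List Int) (N : Nat) (row : List Int) (j : Nat) : List Int :=
  (row.set j (a.getD j 0)).set (j + N) (b.getD j 0)

def pvBody (a b c d : List Int) (N i : Nat) (g : List (List Int)) (j : Nat) : List (List Int) :=
  pvSetN (pvSetN (pvSetN (pvSetN g i j (a.getD j 0)) i (j+N) (b.getD j 0)) (i+N) j (c.getD j 0)) (i+N) (j+N) (d.getD j 0)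

def pvRow (a b : List Int) (N : Nat) : List Int :=
  (List.range N).foldl (pvRowF a b N) (List.replicate (2*N) 0)

lemma pvSetCell_nat (g : List (List Int)) (i j : Nat) (v : Int) :
    pvSetCell g i j v = pvSetN g i j v := by
  simp [pvSetCell, pvSetN]

lemma pvGetCell_nat (m : List (List Int)) (i j : Nat) :
    pvGetCell m i j = (m.getD i []).getD j 0 := by
  simp [pvGetCell, List.getD_eq_getElem?_getD]

lemma pv_A_nat (c11 c12 c21 c22 : List (List Int)) :
    combine_quarters c11 c12 c21 c22 =
    (List.range c11.length).foldl (fun g i =>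
      (List.range c11.length).foldl
        (pvBody (c11.getD i []) (c12.getD i []) (c21.getD i []) (c22.getD i []) c11.length i) g)
      (List.replicate (2*c11.length) (List.replicate (2*c11.length) 0)) := by
  unfold combine_quarters
  simp only [PySem.List.pyRange_one, Int.sub_zero, Int.toNat_natCast, List.foldl_map, zero_add]
  rw [show ((2:Int) * (c11.length:Int)).toNat = 2*c11.length by omega]
  congr 1
  funext g i
  congr 1
  funext g j
  simp only [← Nat.cast_add, pvSetCell_nat, pvGetCell_nat, pvBody]

lemma pv_B_nat (c11 c12 c21 c22 : List (List Int)) :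
    combine_quarters_alt c11 c12 c21 c22 =
    (List.range c11.length).map (fun i => (c11.getD i []).take c11.length ++ (c12.getD i []).take c11.length) ++
    (List.range c11.length).map (fun i => (c21.getD i []).take c11.length ++ (c22.getD i []).take c11.length) := by
  unfold combine_quarters_alt
  simp only [PySem.List.pyRange_one, Int.sub_zero, Int.toNat_natCast, List.map_map, zero_add]
  congr 1 <;>
  · apply List.map_congr_left
    intro i _
    simp [PySem.List.slice_to_natCast, List.getD_eq_getElem?_getD]

lemma pv_set_getD_ne (g : List (List Int)) (i k : Nat) (x : List Int) (h : i ≠ k) :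
    (g.set i x).getD k [] = g.getD k [] := by
  simp [List.getD, List.getElem?_set_ne h]

lemma pv_set_getD_self (g : List (List Int)) (i : Nat) (f : List Int → List Int)
    (hf : f [] = []) : (g.set i (f (g.getD i []))).getD i [] = f (g.getD i []) := by
  rcases lt_or_ge i g.length with h | h
  · simp [List.getD, h]
  · simp [List.set_eq_of_length_le h, List.getD, List.getElem?_eq_none h, hf]

lemma pv_set_getD_id (g : List (List Int)) (i : Nat) : g.set i (g.getD i []) = g := by
  rcases lt_or_ge i g.length with h | h
  · simp [List.getD, List.getElem?_eq_getElem h]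
  · simp [List.set_eq_of_length_le h]

lemma pvSetN_pvSetN_self (g : List (List Int)) (i j j' : Nat) (v w : Int) :
    pvSetN (pvSetN g i j v) i j' w = g.set i (((g.getD i []).set j v).set j' w) := by
  unfold pvSetN
  rw [pv_set_getD_self g i (fun r => r.set j v) (by simp), List.set_set]

lemma pv_body_decomp (a b c d : List Int) (N i : Nat) (hne : i ≠ i + N)
    (g : List (List Int)) (j : Nat) :
    pvBody a b c d N i g j =
    (g.set i (pvRowF a b N (g.getD i []) j)).set (i+N) (pvRowF c d N (g.getD (i+N) []) j) := by
  unfold pvBody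
  rw [pvSetN_pvSetN_self, pvSetN_pvSetN_self, pv_set_getD_ne _ i (i+N) _ hne]
  rfl

lemma pv_set_getD_row (S : List (List Int)) (k : Nat) (r : List Int)
    (f : List Int → List Int) (hf : f [] = []) (h : S.getD k [] = r) :
    (S.set k (f r)).getD k [] = f r := by
  subst h; exact pv_set_getD_self S k f hf

lemma pv_inner_decomp (a b c d : List Int) (N i : Nat) (hne : i ≠ i + N) :
    ∀ (js : List Nat) (g : List (List Int)),
    js.foldl (pvBody a b c d N i) g
    = (g.set i (js.foldl (pvRowF a b N) (g.getD i []))).set (i+N)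
        (js.foldl (pvRowF c d N) (g.getD (i+N) [])) := by
  intro js
  induction js with
  | nil =>
    intro g
    simp only [List.foldl_nil]
    rw [pv_set_getD_id, pv_set_getD_id]
  | cons j js ih =>
    intro g
    rw [List.foldl_cons, ih, pv_body_decomp a b c d N i hne]
    rw [pv_set_getD_ne _ (i+N) i _ (Ne.symm hne),
        pv_set_getD_row g i (g.getD i []) (fun r => pvRowF a b N r j) (by simp [pvRowF]) rfl]
    rw [pv_set_getD_row _ (i+N) (g.getD (i+N) []) (fun r => pvRowF c d N r j)
          (by simp [pvRowF]) (pv_set_getD_ne g i (i+N) _ hne)]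
    rw [List.set_comm _ _ (Ne.symm hne), List.set_set, List.set_set, List.foldl_cons, List.foldl_cons]

lemma pv_fill_step {α : Type} (z x y : α) (p q : List α) (m N : Nat)
    (hp : p.length = m) (hq : q.length = m) (hm : m < N) :
    ((p ++ (List.replicate (N-m) z ++ (q ++ List.replicate (N-m) z))).set m x).set (m+N) y
    = (p ++ [x]) ++ (List.replicate (N-(m+1)) z ++ ((q ++ [y]) ++ List.replicate (N-(m+1)) z)) := by
  have h1 : N - m = (N - (m+1)) + 1 := by omega
  have hin : (p ++ (List.replicate (N-m) z ++ (q ++ List.replicate (N-m) z))).set m x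
      = p ++ ((x :: List.replicate (N-(m+1)) z) ++ (q ++ (z :: List.replicate (N-(m+1)) z))) := by
    rw [show List.replicate (N-m) z = z :: List.replicate (N-(m+1)) z from by
          rw [h1, List.replicate_succ]]
    rw [List.set_append_right _ _ (by omega), hp, Nat.sub_self]
    rw [List.set_append_left _ _ (by simp), List.set_cons_zero]
  rw [hin]
  rw [List.set_append_right _ _ (by omega)]
  rw [show m + N - p.length = N from by omega]
  rw [List.set_append_right _ _ (by simp; omega)]
  rw [show N - (x :: List.replicate (N-(m+1)) z).length = m from by simp; omega]
  rw [List.set_append_right _ _ (by omega)]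
  rw [show m - q.length = 0 from by omega]
  rw [List.set_cons_zero]
  simp
lemma pv_getD_fst {α : Type} (z d : α) (p rest : List α) (m k : Nat)
    (hp : p.length = m) (hk : 0 < k) :
    (p ++ (List.replicate k z ++ rest)).getD m d = z := by
  rcases k with _ | k
  · omega
  · subst hp; simp [List.getD]

lemma pv_getD_snd {α : Type} (z d : α) (p q : List α) (m N : Nat)
    (hp : p.length = m) (hq : q.length = m) (hm : m < N) :
    (p ++ (List.replicate (N-m) z ++ (q ++ List.replicate (N-m) z))).getD (m+N) d = z := by
  have h1 : N - m = (N - (m+1)) + 1 := by omega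
  rw [List.getD, List.getElem?_append_right (by omega)]
  rw [List.getElem?_append_right (by simp; omega)]
  rw [List.getElem?_append_right (by simp; omega)]
  rw [h1]
  rw [List.getElem?_replicate]
  simp only [hp, hq]
  rw [if_pos (by simp; omega)]
  rfl

lemma pv_row_fill (a b : List Int) (N : Nat) : ∀ m, m ≤ N →
    (List.range m).foldl (pvRowF a b N) (List.replicate (2*N) 0)
    = (List.range m).map (fun j => a.getD j 0) ++
      (List.replicate (N-m) 0 ++ ((List.range m).map (fun j => b.getD j 0) ++ List.replicate (N-m) 0)) := by
  intro m
  induction m with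
  | zero => intro _; rw [two_mul, List.replicate_add]; simp
  | succ m ih =>
    intro hm
    rw [List.range_succ, List.foldl_append, List.foldl_cons, List.foldl_nil, ih (by omega)]
    show pvRowF a b N _ m = _
    unfold pvRowF
    rw [pv_fill_step 0 (a.getD m 0) (b.getD m 0) _ _ m N (by simp) (by simp) (by omega)]
    simp

lemma pv_map_getD_take (a : List Int) (N : Nat) (h : N ≤ a.length) :
    (List.range N).map (fun j => a.getD j 0) = a.take N := by
  apply List.ext_getElem
  · simp; omega
  · intro k h1 h2
    simp at h1 ⊢
    rw [List.getElem?_eq_getElem (by omega)]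
    simp

lemma pv_pvRow_take (a b : List Int) (N : Nat) (ha : N ≤ a.length) (hb : N ≤ b.length) :
    pvRow a b N = a.take N ++ b.take N := by
  unfold pvRow
  rw [pv_row_fill a b N N le_rfl, pv_map_getD_take a N ha, pv_map_getD_take b N hb,
    Nat.sub_self]
  simp

lemma pv_grid_fill (c11 c12 c21 c22 : List (List Int)) (N : Nat) : ∀ m, m ≤ N →
    (List.range m).foldl (fun g i =>
      (List.range N).foldl
        (pvBody (c11.getD i []) (c12.getD i []) (c21.getD i []) (c22.getD i []) N i) g)
      (List.replicate (2*N) (List.replicate (2*N) 0))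
    = (List.range m).map (fun i => pvRow (c11.getD i []) (c12.getD i []) N) ++
      (List.replicate (N-m) (List.replicate (2*N) 0) ++
        ((List.range m).map (fun i => pvRow (c21.getD i []) (c22.getD i []) N) ++
          List.replicate (N-m) (List.replicate (2*N) 0))) := by
  intro m
  induction m with
  | zero => intro _; rw [two_mul, List.replicate_add]; simp
  | succ m ih =>
    intro hm
    rw [List.range_succ, List.foldl_append, List.foldl_cons, List.foldl_nil, ih (by omega)]
    rw [pv_inner_decomp _ _ _ _ N m (by omega) (List.range N)]
    rw [pv_getD_fst _ _ _ _ m (N-m) (by simp) (by omega)]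
    rw [pv_getD_snd _ _ _ _ m N (by simp) (by simp) (by omega)]
    rw [pv_fill_step (List.replicate (2*N) 0) _ _ _ _ m N (by simp) (by simp) (by omega)]
    simp [pvRow]

lemma pv_getElem_mem_take {α} (l : List α) (n i : Nat) (hi : i < n) (hl : i < l.length) :
    l[i] ∈ l.take n := by
  have h2 : i < (l.take n).length := by simp; omega
  have h3 : (l.take n)[i] = l[i] := List.getElem_take
  rw [← h3]
  exact List.getElem_mem h2

-- ===== VERDICT (by name: the statement is the Claim_ definition above) =====
theorem combine_quarters_spec : Claim_equal_combine_quarters := by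
  intro c11 c12 c21 c22 _hdom hpre
  obtain ⟨h12, h21, h22, hr11, hr12, hr21, hr22⟩ := hpre
  unfold Spec_combine_quarters
  rw [pv_A_nat, pv_B_nat, pv_grid_fill c11 c12 c21 c22 c11.length c11.length le_rfl,
    Nat.sub_self]
  simp only [List.replicate_zero, List.append_nil, List.nil_append]
  congr 1
  · apply List.map_congr_left
    intro i hi
    rw [List.mem_range] at hi
    apply pv_pvRow_take
    · exact hr11 _ (by rw [List.getD_eq_getElem c11 [] hi]; exact List.getElem_mem hi)
    · refine hr12 _ ?_
      rw [List.getD_eq_getElem c12 [] (by omega)]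
      exact pv_getElem_mem_take c12 c11.length i hi (by omega)
  · apply List.map_congr_left
    intro i hi
    rw [List.mem_range] at hi
    apply pv_pvRow_take
    · refine hr21 _ ?_
      rw [List.getD_eq_getElem c21 [] (by omega)]
      exact pv_getElem_mem_take c21 c11.length i hi (by omega)
    · refine hr22 _ ?_
      rw [List.getD_eq_getElem c22 [] (by omega)]
      exact pv_getElem_mem_take c22 c11.length i hi (by omega)
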